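-- pv_equiv track=rewrite | github.com/leekh4232/study-coding-test | 프로그래머스/5/49190. 방의 개수/방의 개수.py | solution
-- ===== SOURCE A (Python) =====
-- def solution(arrows):
--     # 8방향 이동을 위한 dx, dy 설정 (0~7 방향)
--     dx = [0, 1, 1, 1, 0, -1, -1, -1]   # x축 이동값
--     dy = [-1, -1, 0, 1, 1, 1, 0, -1]   # y축 이동값
--
--     # 시작 위치를 (0, 0)으로 설정
--     x, y = 0, 0
--
--     # 방문한 좌표(노드)를 저장할 Set
--     visitedNode = set()
--     visitedNode.add((x, y))   # 시작 노드 추가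
--
--     # 이동한 경로(간선)를 저장할 Set
--     route = set()
--
--     # 방(사이클) 개수
--     cycle = 0
--
--     # 주어진 방향 배열을 따라 이동
--     for arrow in arrows:
--         # 대각선 교차점을 정확히 처리하기 위해 한 방향 이동을 두 번 수행
--         for _ in range(2):
--             # 다음 좌표 계산
--             nx, ny = x + dx[arrow], y + dy[arrow]
--
--             # 이미 방문한 노드인데, 처음 가는 경로라면 방이 생김
--             if (nx, ny) in visitedNode and (x, y, nx, ny) not in route:
--                 cycle += 1
--
--             # 이동 경로(간선)를 양방향으로 기록
--             route.add((x, y, nx, ny))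
--             route.add((nx, ny, x, y))
--
--             # 방문한 좌표(노드)를 기록
--             visitedNode.add((nx, ny))
--
--             # 현재 위치 갱신
--             x, y = nx, ny
--
--     return cycle
-- ===== SOURCE B (Python) =====
-- def solution(arrows):
--     dx = [0, 1, 1, 1, 0, -1, -1, -1]
--     dy = [-1, -1, 0, 1, 1, 1, 0, -1]
--     # staged passes: 1) step deltas (each arrow doubled), 2) point list, 3) set sizes
--     deltas = [(dx[a], dy[a]) for a in arrows for _ in (0, 1)]
--     pts = [(0, 0)]
--     for sx, sy in deltas:
--         x, y = pts[-1]
--         pts.append((x + sx, y + sy))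
--     nodes = set(pts)
--     edges = {(p, q) if p <= q else (q, p) for p, q in zip(pts, pts[1:])}
--     # the walk's graph is connected, so rooms = E - V + 1 (Euler)
--     return len(edges) - len(nodes) + 1
-- ===== Notes on version B (the rewrite author's own statement) =====
-- stated objective: alternative
-- what changed: B drops A's stateful walk with per-step back-edge test and incremental cycle counter; it first materialises the doubled step deltas and the full point list, then forms the node set and the deduplicated undirected edge set and returns the Euler characteristic len(edges) - len(nodes) + 1 of the (always connected) traversed graph.
import Mathlib
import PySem

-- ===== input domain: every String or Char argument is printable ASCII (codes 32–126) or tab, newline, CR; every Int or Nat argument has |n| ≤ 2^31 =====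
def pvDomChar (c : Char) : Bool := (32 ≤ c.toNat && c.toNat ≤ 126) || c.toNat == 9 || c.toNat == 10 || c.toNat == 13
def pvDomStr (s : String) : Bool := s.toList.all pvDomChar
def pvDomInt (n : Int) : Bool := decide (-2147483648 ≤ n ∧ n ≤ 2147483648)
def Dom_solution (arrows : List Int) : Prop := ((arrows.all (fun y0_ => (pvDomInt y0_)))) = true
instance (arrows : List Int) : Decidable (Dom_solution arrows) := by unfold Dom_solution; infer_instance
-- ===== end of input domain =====

-- B replaces A's stateful walk (per-step back-edge test, incremental cycle counter) by staged
-- passes: the doubled delta list, then the point list, then the Euler formula E - V + 1 on the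
-- node set and the deduplicated undirected edge set (objective: alternative decomposition).

-- ===== PORT A =====
def dxA : List Int := [0, 1, 1, 1, 0, -1, -1, -1]
def dyA : List Int := [-1, -1, 0, 1, 1, 1, 0, -1]

structure StA where
  x : Int
  y : Int
  vis : PySem.Set (Int × Int)
  route : PySem.Set (Int × Int × Int × Int)
  cyc : Int

def stepA (arrow : Int) (s : StA) : StA :=
  let nx := s.x + PySem.List.pyGetD dxA arrow 0
  let ny := s.y + PySem.List.pyGetD dyA arrow 0
  { x := nx, y := ny,
    cyc := if (nx, ny) ∈ s.vis ∧ (s.x, s.y, nx, ny) ∉ s.route then s.cyc + 1 else s.cyc,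
    route := PySem.Set.add (PySem.Set.add s.route (s.x, s.y, nx, ny)) (nx, ny, s.x, s.y),
    vis := PySem.Set.add s.vis (nx, ny) }

def solution (arrows : List Int) : Int :=
  (arrows.foldl (fun s a => stepA a (stepA a s))
    { x := 0, y := 0, vis := PySem.Set.add PySem.Set.empty (0, 0),
      route := PySem.Set.empty, cyc := 0 }).cyc

-- ===== PORT B =====
def dxB : List Int := [0, 1, 1, 1, 0, -1, -1, -1]
def dyB : List Int := [-1, -1, 0, 1, 1, 1, 0, -1]

-- Python tuple '<=' on (Int × Int), lexicographic
def lexLe (p q : Int × Int) : Bool := decide (p.1 < q.1 ∨ (p.1 = q.1 ∧ p.2 ≤ q.2))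

-- the undirected edge stored with the lexicographically smaller endpoint first
def normEdge (p q : Int × Int) : (Int × Int) × (Int × Int) := if lexLe p q then (p, q) else (q, p)

-- pass 1: the comprehension [(dx[a], dy[a]) for a in arrows for _ in (0, 1)]
def deltasB (arrows : List Int) : List (Int × Int) :=
  arrows.flatMap (fun a =>
    [(PySem.List.pyGetD dxB a 0, PySem.List.pyGetD dyB a 0),
     (PySem.List.pyGetD dxB a 0, PySem.List.pyGetD dyB a 0)])

-- pass 2: appending partial sums, starting after point (x, y)
def scanPts (x y : Int) : List (Int × Int) → List (Int × Int)
  | [] => []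
  | (sx, sy) :: rest => (x + sx, y + sy) :: scanPts (x + sx) (y + sy) rest

-- the edge-set comprehension over zip(pts, pts[1:]); pts[1:] is the tail (pts is nonempty)
def edgeListB (pts : List (Int × Int)) : List ((Int × Int) × (Int × Int)) :=
  (pts.zip pts.tail).map (fun pq => normEdge pq.1 pq.2)

def solution_alt (arrows : List Int) : Int :=
  let pts := (0, 0) :: scanPts 0 0 (deltasB arrows)
  let nodes := PySem.Set.ofList pts
  let edges := PySem.Set.ofList (edgeListB pts)
  PySem.Set.len edges - PySem.Set.len nodes + 1

-- ===== PRECONDITION & SPEC =====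
-- Pre_ excludes arrows outside -8..7, on which the Python A (and B) raises IndexError at dx[arrow].
def Pre_solution (arrows : List Int) : Prop := ∀ a ∈ arrows, -8 ≤ a ∧ a < 8
instance (arrows : List Int) : Decidable (Pre_solution arrows) := by unfold Pre_solution; infer_instance
def pvWitness_solution : List Int := [0, 2, 4, 6]

def Spec_solution (arrows : List Int) (out : Int) : Prop := out = solution_alt arrows
instance (arrows : List Int) (out : Int) : Decidable (Spec_solution arrows out) := by unfold Spec_solution; infer_instance

-- ===== CLAIM (what is proved, stated in full; the proofs are below) =====
def Claim_equal_solution : Prop := ∀ (arrows : List Int), Dom_solution arrows → Pre_solution arrows → Spec_solution arrows (solution arrows)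

-- ===== LEMMAS AND PROOFS =====

theorem norm_comm (p q : Int × Int) : normEdge q p = normEdge p q := by
  obtain ⟨p1, p2⟩ := p; obtain ⟨q1, q2⟩ := q
  simp only [normEdge, lexLe]
  split_ifs with h1 h2 h2 <;> simp_all <;> omega

theorem norm_eq_iff (u v p q : Int × Int) :
    normEdge u v = normEdge p q ↔ (u = p ∧ v = q) ∨ (u = q ∧ v = p) := by
  constructor
  · intro h
    simp only [normEdge] at h
    split_ifs at h <;> simp only [Prod.mk.injEq] at h <;> tauto
  · rintro (⟨rfl, rfl⟩ | ⟨rfl, rfl⟩)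
    · rfl
    · exact norm_comm _ _

theorem length_add {α : Type} [BEq α] [LawfulBEq α] (s : PySem.Set α) (x : α) :
    (PySem.Set.add s x).length = if x ∈ s then s.length else s.length + 1 := by
  rw [PySem.Set.add_eq_ite]; split_ifs <;> simp

-- proof-only mirror of one half-step of B's edge/node collection, driven by a delta
structure StB where
  x : Int
  y : Int
  nodes : PySem.Set (Int × Int)
  edges : PySem.Set ((Int × Int) × (Int × Int))

def gStep (d : Int × Int) (t : StB) : StB :=
  { x := t.x + d.1, y := t.y + d.2,
    edges := PySem.Set.add t.edges (normEdge (t.x, t.y) (t.x + d.1, t.y + d.2)),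
    nodes := PySem.Set.add t.nodes (t.x + d.1, t.y + d.2) }

def InvAB (a : StA) (b : StB) : Prop :=
  a.x = b.x ∧ a.y = b.y ∧ a.vis = b.nodes ∧
  (a.x, a.y) ∈ a.vis ∧
  (∀ u v : Int × Int, (u.1, u.2, v.1, v.2) ∈ a.route ↔ normEdge u v ∈ b.edges) ∧
  (∀ u v : Int × Int, (u, v) ∈ b.edges → u ∈ a.vis ∧ v ∈ a.vis) ∧
  a.cyc = (b.edges.length : Int) - (b.nodes.length : Int) + 1

theorem step_inv (arrow : Int) (a : StA) (b : StB) (h : InvAB a b) :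
    InvAB (stepA arrow a)
      (gStep (PySem.List.pyGetD dxA arrow 0, PySem.List.pyGetD dyA arrow 0) b) := by
  obtain ⟨hx, hy, hV, hpos, hR, hE, hc⟩ := h
  have hxv : b.x = a.x := hx.symm
  have hyv : b.y = a.y := hy.symm
  set nx := a.x + PySem.List.pyGetD dxA arrow 0 with hnx
  set ny := a.y + PySem.List.pyGetD dyA arrow 0 with hny
  have hsB : gStep (PySem.List.pyGetD dxA arrow 0, PySem.List.pyGetD dyA arrow 0) b =
      { x := nx, y := ny,
        edges := PySem.Set.add b.edges (normEdge (a.x, a.y) (nx, ny)),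
        nodes := PySem.Set.add b.nodes (nx, ny) } := by
    simp only [gStep, hxv, hyv]
    rfl
  have hsA : stepA arrow a =
      { x := nx, y := ny,
        cyc := if (nx, ny) ∈ a.vis ∧ (a.x, a.y, nx, ny) ∉ a.route then a.cyc + 1 else a.cyc,
        route := PySem.Set.add (PySem.Set.add a.route (a.x, a.y, nx, ny)) (nx, ny, a.x, a.y),
        vis := PySem.Set.add a.vis (nx, ny) } := by
    simp only [stepA]
    rfl
  rw [hsA, hsB]
  have hkey : ((a.x, a.y, nx, ny) ∈ a.route) ↔ normEdge (a.x, a.y) (nx, ny) ∈ b.edges :=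
    hR (a.x, a.y) (nx, ny)
  refine ⟨rfl, rfl, by rw [hV], ?_, ?_, ?_, ?_⟩
  · simp [PySem.Set.mem_add]
  · intro u v
    simp only [PySem.Set.mem_add]
    constructor
    · rintro ((hmem | hq1) | hq2)
      · exact Or.inl ((hR u v).mp hmem)
      · right
        simp only [Prod.mk.injEq] at hq1
        obtain ⟨h1, h2, h3, h4⟩ := hq1
        have hu : u = (a.x, a.y) := Prod.ext h1 h2
        have hv : v = (nx, ny) := Prod.ext h3 h4
        rw [hu, hv]
      · right
        simp only [Prod.mk.injEq] at hq2
        obtain ⟨h1, h2, h3, h4⟩ := hq2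
        have hu : u = (nx, ny) := Prod.ext h1 h2
        have hv : v = (a.x, a.y) := Prod.ext h3 h4
        rw [hu, hv]; exact norm_comm _ _
    · rintro (hmem | heq)
      · exact Or.inl (Or.inl ((hR u v).mpr hmem))
      · rcases (norm_eq_iff u v (a.x, a.y) (nx, ny)).mp heq with ⟨rfl, rfl⟩ | ⟨rfl, rfl⟩
        · exact Or.inl (Or.inr rfl)
        · exact Or.inr rfl
  · intro u v hm
    rcases (PySem.Set.mem_add _ _ _).mp hm with hold | hnew
    · obtain ⟨h1, h2⟩ := hE u v hold
      exact ⟨(PySem.Set.mem_add _ _ _).mpr (Or.inl h1), (PySem.Set.mem_add _ _ _).mpr (Or.inl h2)⟩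
    · simp only [normEdge] at hnew
      split_ifs at hnew <;> simp only [Prod.mk.injEq] at hnew <;>
        obtain ⟨rfl, rfl⟩ := hnew <;>
        exact ⟨by simp [PySem.Set.mem_add, hpos], by simp [PySem.Set.mem_add, hpos]⟩
  · rw [length_add b.edges, length_add b.nodes]
    by_cases hq : (nx, ny) ∈ a.vis
    · by_cases hr : (a.x, a.y, nx, ny) ∈ a.route
      · have he : normEdge (a.x, a.y) (nx, ny) ∈ b.edges := hkey.mp hr
        have hqn : (nx, ny) ∈ b.nodes := hV ▸ hq
        simp only [if_pos he, if_pos hqn]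
        simp only [hq, hr, not_true, and_false, if_false]
        exact hc
      · have he : normEdge (a.x, a.y) (nx, ny) ∉ b.edges := fun h => hr (hkey.mpr h)
        have hqn : (nx, ny) ∈ b.nodes := hV ▸ hq
        simp only [if_neg he, if_pos hqn]
        simp only [hq, hr, not_false_iff, and_true, if_pos trivial]
        push_cast
        omega
    · have he : normEdge (a.x, a.y) (nx, ny) ∉ b.edges := by
        intro hmem
        have := hE _ _ (by
          have : normEdge (a.x, a.y) (nx, ny) =
              ((normEdge (a.x, a.y) (nx, ny)).1, (normEdge (a.x, a.y) (nx, ny)).2) := rfl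
          rw [this] at hmem; exact hmem)
        have hin : (nx, ny) ∈ a.vis := by
          simp only [normEdge] at this
          split_ifs at this
          · exact this.2
          · exact this.1
        exact hq hin
      have hqn : (nx, ny) ∉ b.nodes := fun h => hq (hV ▸ h)
      simp only [if_neg he, if_neg hqn]
      simp only [hq, false_and, if_false]
      push_cast
      omega

theorem fold_inv (l : List Int) (a : StA) (b : StB) (h : InvAB a b) :
    InvAB (l.foldl (fun s x => stepA x (stepA x s)) a)
      ((deltasB l).foldl (fun t d => gStep d t) b) := by
  induction l generalizing a b with
  | nil => exact h
  | cons hd tl ih =>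
    simp only [deltasB, List.flatMap_cons, List.cons_append, List.nil_append, List.foldl_cons]
    exact ih _ _ (step_inv hd _ _ (step_inv hd _ _ h))

-- proof-only: consecutive normalized edges of a point list starting after p
def edgeFrom : (Int × Int) → List (Int × Int) → List ((Int × Int) × (Int × Int))
  | _, [] => []
  | p, q :: qs => normEdge p q :: edgeFrom q qs

theorem edgeListB_eq (qs : List (Int × Int)) (p : Int × Int) :
    edgeListB (p :: qs) = edgeFrom p qs := by
  induction qs generalizing p with
  | nil => rfl
  | cons q qs ih =>
    simp only [edgeListB, List.tail_cons, List.zip_cons_cons, List.map_cons, edgeFrom]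
    exact congrArg _ (ih q)

theorem g_fold_char (ds : List (Int × Int)) (t : StB) :
    (ds.foldl (fun t d => gStep d t) t).nodes
        = (scanPts t.x t.y ds).foldl PySem.Set.add t.nodes ∧
    (ds.foldl (fun t d => gStep d t) t).edges
        = (edgeFrom (t.x, t.y) (scanPts t.x t.y ds)).foldl PySem.Set.add t.edges := by
  induction ds generalizing t with
  | nil => exact ⟨rfl, rfl⟩
  | cons d ds ih =>
    obtain ⟨dx, dy⟩ := d
    simpa [scanPts, edgeFrom, gStep] using ih (gStep (dx, dy) t)

-- ===== VERDICT (by name: the statement is the Claim_ definition above) =====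
theorem solution_spec : Claim_equal_solution := by
  intro arrows _ _
  unfold Spec_solution solution solution_alt
  have h := fold_inv arrows
    { x := 0, y := 0, vis := PySem.Set.add PySem.Set.empty (0, 0),
      route := PySem.Set.empty, cyc := 0 }
    { x := 0, y := 0, nodes := PySem.Set.add PySem.Set.empty (0, 0), edges := PySem.Set.empty }
    (by
      refine ⟨rfl, rfl, rfl, by decide, ?_, ?_, by decide⟩
      · intro u v; simp [PySem.Set.empty]
      · intro u v hmem; simp [PySem.Set.empty] at hmem)
  obtain ⟨-, -, -, -, -, -, hc⟩ := h
  obtain ⟨hn, he⟩ := g_fold_char (deltasB arrows)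
    { x := 0, y := 0, nodes := PySem.Set.add PySem.Set.empty (0, 0), edges := PySem.Set.empty }
  rw [hn, he] at hc
  simp only [edgeListB_eq]
  simpa [PySem.Set.len, PySem.Set.ofList_eq_foldl, PySem.Set.empty] using hc
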